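-- pv_equiv track=rewrite | github.com/rileystephens28/F.A.M. | exchanges/exchange_apis/binance.py | get_order_params
-- ===== SOURCE A (Python) =====
-- def get_order_params(data):
--     """Convert params to list with signature as last element"""
--     has_signature = False
--     params = []
--     for key, value in data.items():
--         if key == 'signature':
--             has_signature = True
--         else:
--             params.append((key, value))
--     if has_signature:
--         params.append(('signature', data['signature']))
--     return params
-- ===== SOURCE B (Python) =====
-- def get_order_params(data):
--     """Convert params to list with signature as last element"""
--     return sorted(data.items(), key=lambda kv: kv[0] == 'signature')
-- ===== Notes on version B (the rewrite author's own statement) =====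
-- stated objective: idiomatic
-- what changed: Replaces the flag+filter loop and final dict lookup with a single stable sort of data.items() keyed on kv[0] == 'signature', which keeps non-signature items in order and pushes the signature entry to the end.
import Mathlib
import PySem

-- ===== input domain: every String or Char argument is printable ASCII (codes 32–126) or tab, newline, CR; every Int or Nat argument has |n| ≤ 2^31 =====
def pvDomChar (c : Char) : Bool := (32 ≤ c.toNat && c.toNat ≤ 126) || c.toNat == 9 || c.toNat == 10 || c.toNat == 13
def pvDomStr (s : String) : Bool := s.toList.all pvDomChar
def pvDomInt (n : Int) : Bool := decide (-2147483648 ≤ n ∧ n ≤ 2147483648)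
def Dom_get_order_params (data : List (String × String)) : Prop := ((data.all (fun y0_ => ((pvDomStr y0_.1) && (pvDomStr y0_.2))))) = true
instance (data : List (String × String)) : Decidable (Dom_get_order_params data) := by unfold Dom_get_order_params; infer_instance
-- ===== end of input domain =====

-- B replaces A's flag+append loop (+ final dict lookup) with one stable sort keyed on
-- kv.1 == "signature" (idiomatic; return value only — neither version mutates its argument).

-- ===== PORT A =====
-- loop state: (has_signature, params); data['signature'] is the first-match dict lookup
def get_order_params (data : List (String × String)) : List (String × String) :=
  let st := data.foldl
    (fun (st : Bool × List (String × String)) kv =>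
      if kv.1 == "signature" then (true, st.2) else (st.1, st.2 ++ [kv]))
    (false, [])
  if st.1 then st.2 ++ [("signature", (PySem.Dict.mk data).getD "signature" "")] else st.2

-- ===== PORT B =====
def get_order_params_alt (data : List (String × String)) : List (String × String) :=
  PySem.List.sorted data (fun kv => kv.1 == "signature") false

-- ===== PRECONDITION & SPEC =====
-- Pre_ excludes association lists with duplicate keys: they do not represent a Python
-- dict (a dict collapses duplicates before A ever sees them), so A's behaviour there is
-- not defined by the source.
def Pre_get_order_params (data : List (String × String)) : Prop :=
  (data.map Prod.fst).Nodup
instance (data : List (String × String)) : Decidable (Pre_get_order_params data) := by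
  unfold Pre_get_order_params; infer_instance

def pvWitness_get_order_params : (List (String × String)) :=
  [("symbol", "BTCUSDT"), ("signature", "abc12"), ("qty", "3")]

def Spec_get_order_params (data : List (String × String)) (out : List (String × String)) : Prop := out = get_order_params_alt data
instance (data : List (String × String)) (out : List (String × String)) : Decidable (Spec_get_order_params data out) := by unfold Spec_get_order_params; infer_instance

-- ===== CLAIM (what is proved, stated in full; the proofs are below) =====
def Claim_equal_get_order_params : Prop := ∀ (data : List (String × String)), Dom_get_order_params data → Pre_get_order_params data → Spec_get_order_params data (get_order_params data)

-- ===== LEMMAS AND PROOFS =====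

-- inserting x before the first element satisfying `before x ·`, split form
theorem insertBy_step {α : Type} (b : α → α → Bool) (x y : α) (ys : List α) :
    PySem.List.insertBy b x (y :: ys)
      = if b x y then x :: y :: ys else y :: PySem.List.insertBy b x ys := by
  simp [PySem.List.insertBy]

theorem insertBy_split {α : Type} (before : α → α → Bool) (x : α) (F T : List α)
    (hF : ∀ y ∈ F, before x y = false) (hT : ∀ y ∈ T, before x y = true) :
    PySem.List.insertBy before x (F ++ T) = F ++ x :: T := by
  induction F with
  | nil =>
    cases T with
    | nil => rfl
    | cons t ts => simp [insertBy_step, hT t (by simp)]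
  | cons f fs ih =>
    rw [List.cons_append, insertBy_step, if_neg (by simp [hF f (by simp)]),
      ih (fun y hy => hF y (by simp [hy]))]
    rfl

-- stable sort by a Bool key is "falses (in order) then trues (in order)"
theorem foldl_insertBy_bool {α : Type} (key : α → Bool) :
    ∀ (xs F T : List α), (∀ y ∈ F, key y = false) → (∀ y ∈ T, key y = true) →
    xs.foldl (fun acc x => PySem.List.insertBy (fun a b => decide (key a < key b)) x acc) (F ++ T)
      = (F ++ xs.filter (fun x => !key x)) ++ (T ++ xs.filter key) := by
  intro xs
  induction xs with
  | nil => intro F T _ _; simp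
  | cons x rest ih =>
    intro F T hF hT
    simp only [List.foldl_cons]
    by_cases hx : key x = true
    · have hnb : ∀ y ∈ F ++ T, (decide (key x < key y)) = false := by
        intro y _; simp [hx, Bool.lt_iff]
      have hT' : ∀ y ∈ T ++ [x], key y = true := by
        intro y hy
        rcases List.mem_append.1 hy with h | h
        · exact hT y h
        · rw [List.mem_singleton.1 h]; exact hx
      rw [PySem.List.insertBy_of_forall_not_before _ _ _ hnb, List.append_assoc,
        ih F (T ++ [x]) hF hT']
      simp [List.filter_cons, hx]
    · have hx' : key x = false := by simpa using hx
      have hF' : ∀ y ∈ F ++ [x], key y = false := by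
        intro y hy
        rcases List.mem_append.1 hy with h | h
        · exact hF y h
        · rw [List.mem_singleton.1 h]; exact hx'
      rw [insertBy_split _ x F T
          (by intro y hy; simp [hF y hy, hx', Bool.lt_iff])
          (by intro y hy; simp [hT y hy, hx', Bool.lt_iff]),
        show F ++ x :: T = (F ++ [x]) ++ T by simp,
        ih (F ++ [x]) T hF' hT]
      simp [List.filter_cons, hx']

theorem sorted_bool_key {α : Type} (key : α → Bool) (xs : List α) :
    PySem.List.sorted xs key false = xs.filter (fun x => !key x) ++ xs.filter key := by
  rw [PySem.List.sorted_eq_foldl_insertBy]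
  simpa using foldl_insertBy_bool key xs [] [] (by simp) (by simp)

-- A's loop computes (any signature?, non-signature items in order)
theorem foldA_spec (xs : List (String × String)) :
    ∀ (b : Bool) (acc : List (String × String)),
    xs.foldl (fun (st : Bool × List (String × String)) kv =>
        if kv.1 == "signature" then (true, st.2) else (st.1, st.2 ++ [kv])) (b, acc)
      = (b || xs.any (fun kv => kv.1 == "signature"),
         acc ++ xs.filter (fun kv => !(kv.1 == "signature"))) := by
  induction xs with
  | nil => intro b acc; simp
  | cons x rest ih =>
    intro b acc
    rw [List.foldl_cons]
    by_cases hx : (x.1 == "signature") = true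
    · rw [if_pos hx, ih]
      simp [List.filter_cons, List.any_cons, hx]
    · have hx' : (x.1 == "signature") = false := by simpa using hx
      rw [if_neg hx, ih]
      simp [List.filter_cons, List.any_cons, hx', List.append_assoc]

-- with unique keys, the signature entries are exactly the dict lookup
theorem filter_sig_of_nodup (data : List (String × String))
    (h : (data.map Prod.fst).Nodup) :
    data.filter (fun kv => kv.1 == "signature")
      = if data.any (fun kv => kv.1 == "signature")
        then [("signature", (PySem.Dict.mk data).getD "signature" "")] else [] := by
  induction data with
  | nil => rfl
  | cons x rest ih =>
    obtain ⟨k, v⟩ := x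
    simp only [List.map_cons, List.nodup_cons] at h
    by_cases hx : k = "signature"
    · have hrest : rest.filter (fun kv => kv.1 == "signature") = [] := by
        rw [List.filter_eq_nil_iff]
        intro kv hkv hsig
        exact h.1 (by
          have : kv.1 = "signature" := by simpa using hsig
          exact hx ▸ this ▸ List.mem_map_of_mem hkv)
      simp [List.filter_cons, hx, hrest, PySem.Dict.getD, PySem.Dict.get?_mk_cons]
    · have hrest := ih h.2
      have hk : (k == "signature") = false := by simpa using hx
      simp [hk, PySem.Dict.getD, PySem.Dict.get?_mk_cons, hrest]
      simp only [hk, Bool.false_or]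

-- ===== VERDICT (by name: the statement is the Claim_ definition above) =====
theorem get_order_params_spec : Claim_equal_get_order_params := by
  intro data _ hpre
  unfold Spec_get_order_params get_order_params get_order_params_alt
  rw [sorted_bool_key, foldA_spec]
  simp only [Bool.false_or]
  rw [filter_sig_of_nodup data hpre]
  by_cases h : data.any (fun kv => kv.1 == "signature") <;> simp [h]
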